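-- pv_equiv track=rewrite | github.com/HuGod-codes/torricos-hugo | actividad1.py | thingToNum
-- ===== SOURCE A (Python) =====
-- def thingToNum(value):
--     num = 0
--     digitos = set(['1','2','3','4','5','6','7','8','9','0'])
--     for i in value:
--         if i == '.':
--             return num
--         elif i in digitos:
--             num = num * 10 + int(i)
--     return num
-- ===== SOURCE B (Python) =====
-- def thingToNum(value):
--     dot = value.find('.')
--     head = value if dot < 0 else value[:dot]
--     digits = [c for c in head if c in '0123456789']
--     return sum((ord(c) - 48) * 10 ** i for i, c in enumerate(reversed(digits)))
-- ===== Notes on version B (the rewrite author's own statement) =====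
-- stated objective: alternative
-- what changed: Replaces the character-by-character early-return Horner loop with a pipeline: find the pre-dot segment with str.find and a slice, filter it to the digit characters with a comprehension, and sum digit*10**position over the reversed digit list (C-level find/slice instead of a per-character Python loop over the whole string).
import Mathlib
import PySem

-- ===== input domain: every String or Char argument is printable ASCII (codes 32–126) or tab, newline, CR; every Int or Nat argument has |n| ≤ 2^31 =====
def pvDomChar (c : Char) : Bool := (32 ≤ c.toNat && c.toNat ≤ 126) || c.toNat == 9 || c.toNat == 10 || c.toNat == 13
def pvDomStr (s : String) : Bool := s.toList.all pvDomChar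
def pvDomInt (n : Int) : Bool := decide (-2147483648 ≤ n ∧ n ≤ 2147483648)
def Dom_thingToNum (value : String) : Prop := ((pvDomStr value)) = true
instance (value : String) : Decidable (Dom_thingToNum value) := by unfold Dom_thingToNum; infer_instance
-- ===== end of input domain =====

-- B replaces A's early-return Horner accumulation loop by a find/slice + filter + positional-sum pipeline (alternative decomposition, same cost).

-- ===== PORT A =====
-- the loop 'for i in value: if i == '.': return num; elif i in digitos: num = num*10 + int(i)'
-- (int(i) on a single digit character is exactly i.toNat - 48)
def thingToNumGo : List Char → Int → Int
  | [], num => num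
  | i :: rest, num =>
    if i = '.' then num
    else if (['1','2','3','4','5','6','7','8','9','0'] : List Char).contains i then
      thingToNumGo rest (num * 10 + ((i.toNat : Int) - 48))
    else thingToNumGo rest num

def thingToNum (value : String) : Int := thingToNumGo value.toList 0

-- ===== PORT B =====
-- dot = value.find('.'); head = value if dot < 0 else value[:dot];
-- digits = [c for c in head if c in '0123456789'];
-- sum((ord(c) - 48) * 10**i for i, c in enumerate(reversed(digits)))
-- (the exponent i from enumerate is nonnegative, so i.toNat is exact for 10**i)
def thingToNum_alt (value : String) : Int :=
  let dot := PySem.Str.find value "."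
  let head := if dot < 0 then value.toList else PySem.List.slice value.toList none (some dot)
  let digits := head.filter (fun c => (['0','1','2','3','4','5','6','7','8','9'] : List Char).contains c)
  ((PySem.List.enumerate digits.reverse 0).map
    (fun p => ((p.2.toNat : Int) - 48) * 10 ^ p.1.toNat)).sum

-- ===== PRECONDITION & SPEC =====
def Spec_thingToNum (value : String) (out : Int) : Prop := out = thingToNum_alt value
instance (value : String) (out : Int) : Decidable (Spec_thingToNum value out) := by unfold Spec_thingToNum; infer_instance

-- ===== CLAIM (what is proved, stated in full; the proofs are below) =====
def Claim_equal_thingToNum : Prop := ∀ (value : String), Dom_thingToNum value → Spec_thingToNum value (thingToNum value)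

-- ===== LEMMAS AND PROOFS =====

-- both digit tests accept exactly the same ten characters
theorem digtest_eq (c : Char) :
    (['1','2','3','4','5','6','7','8','9','0'] : List Char).contains c
      = (['0','1','2','3','4','5','6','7','8','9'] : List Char).contains c := by
  simp only [List.contains_eq_mem, List.mem_cons, List.not_mem_nil, or_false, decide_eq_decide]
  tauto

-- A's loop is the Horner fold over the digits of the pre-dot segment
theorem thingToNumGo_eq (cs : List Char) : ∀ num : Int,
    thingToNumGo cs num
      = ((cs.takeWhile (fun c => !(c == '.'))).filter
          (fun c => (['0','1','2','3','4','5','6','7','8','9'] : List Char).contains c)).foldl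
          (fun n c => n * 10 + ((c.toNat : Int) - 48)) num := by
  induction cs with
  | nil => intro num; simp [thingToNumGo]
  | cons i rest ih =>
    intro num
    by_cases hdot : i = '.'
    · simp [thingToNumGo, hdot]
    · rw [thingToNumGo]
      rw [if_neg hdot, digtest_eq]
      have ht : List.takeWhile (fun c => !(c == '.')) (i :: rest)
          = i :: List.takeWhile (fun c => !(c == '.')) rest := by
        rw [List.takeWhile_cons]; simp [hdot]
      rw [ht, List.filter_cons]
      by_cases hd : (['0','1','2','3','4','5','6','7','8','9'] : List Char).contains i = true
      · rw [if_pos hd, if_pos hd, List.foldl_cons, ih]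
      · rw [if_neg hd, if_neg hd, ih]

-- find('.') characterised: -1 when there is no dot, else the length of the pre-dot prefix
theorem find_go_dot (cs : List Char) : ∀ k : Nat,
    PySem.Chars.find.go ['.'] cs k
      = if '.' ∈ cs then ((k : Int) + (cs.takeWhile (fun c => !(c == '.'))).length) else -1 := by
  induction cs with
  | nil => intro k; simp [PySem.Chars.find.go]
  | cons c rest ih =>
    intro k
    by_cases h : c = '.'
    · simp [PySem.Chars.find.go, h, List.isPrefixOf]
    · have : (['.'] : List Char).isPrefixOf (c :: rest) = false := by
        simp [List.isPrefixOf]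
        exact fun hh => h hh.symm
      rw [PySem.Chars.find.go, this]
      simp only [Bool.false_eq_true, if_false]
      rw [ih (k + 1)]
      by_cases hm : '.' ∈ rest
      · simp [hm, h]
        ring
      · simp [hm, h]
        exact fun hh => absurd hh.symm h

-- taking as many elements as takeWhile keeps gives takeWhile back
theorem take_length_takeWhile (p : Char → Bool) (cs : List Char) :
    cs.take (cs.takeWhile p).length = cs.takeWhile p := by
  induction cs with
  | nil => simp
  | cons c r ih => by_cases h : p c <;> simp [h, ih]

-- B's head is the pre-dot prefix
theorem head_eq (cs : List Char) :
    (if PySem.Chars.find cs ['.'] < 0 then cs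
     else PySem.List.slice cs none (some (PySem.Chars.find cs ['.'])))
      = cs.takeWhile (fun c => !(c == '.')) := by
  unfold PySem.Chars.find
  rw [find_go_dot cs 0]
  by_cases hm : '.' ∈ cs
  · simp only [hm, if_true]
    have h0 : ((0 : Nat) : Int) + ((List.takeWhile (fun c => !(c == '.')) cs).length : Int)
        = (((List.takeWhile (fun c => !(c == '.')) cs).length : Nat) : Int) := by push_cast; ring
    rw [h0, if_neg (not_lt.mpr (Int.natCast_nonneg _)), PySem.List.slice_to_natCast]
    exact take_length_takeWhile _ cs
  · simp only [hm, if_false]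
    rw [if_pos (by norm_num)]
    symm; rw [List.takeWhile_eq_self_iff]
    intro x hx
    simp only [Bool.not_eq_eq_eq_not, Bool.not_true, beq_eq_false_iff_ne, ne_eq]
    exact fun hh => hm (hh ▸ hx)

-- positional sums: shifting the enumeration start multiplies by the power of ten
theorem enumSum_shift (l : List Char) : ∀ s : Nat,
    ((PySem.List.enumerate l (s : Int)).map
      (fun p => ((p.2.toNat : Int) - 48) * 10 ^ p.1.toNat)).sum
      = 10 ^ s * ((PySem.List.enumerate l 0).map
          (fun p => ((p.2.toNat : Int) - 48) * 10 ^ p.1.toNat)).sum := by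
  induction l with
  | nil => intro s; simp
  | cons x l ih =>
    intro s
    rw [PySem.List.enumerate_cons, PySem.List.enumerate_cons]
    have h1 : ((s : Int) + 1) = ((s + 1 : Nat) : Int) := by push_cast; ring
    have h2 : ((0 : Int) + 1) = ((1 : Nat) : Int) := by norm_num
    rw [h1, h2, List.map_cons, List.map_cons, List.sum_cons, List.sum_cons,
        ih (s + 1), ih 1]
    simp only [Int.toNat_natCast, Int.toNat_zero]
    ring

-- the Horner fold equals the positional sum over the reversed digit list
theorem horner_eq_posSum (ds : List Char) :
    ds.foldl (fun n c => n * 10 + ((c.toNat : Int) - 48)) 0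
      = ((PySem.List.enumerate ds.reverse 0).map
          (fun p => ((p.2.toNat : Int) - 48) * 10 ^ p.1.toNat)).sum := by
  induction ds using List.reverseRecOn with
  | nil => simp
  | append_singleton l c ih =>
    rw [List.foldl_append, List.foldl_cons, List.foldl_nil, List.reverse_append,
        List.reverse_singleton, List.singleton_append, PySem.List.enumerate_cons]
    have h2 : ((0 : Int) + 1) = ((1 : Nat) : Int) := by norm_num
    rw [h2, List.map_cons, List.sum_cons, enumSum_shift l.reverse 1, ← ih]
    simp only [Int.toNat_zero, pow_zero, pow_one]
    ring

-- ===== VERDICT (by name: the statement is the Claim_ definition above) =====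
theorem thingToNum_spec : Claim_equal_thingToNum := by
  intro value _
  unfold Spec_thingToNum thingToNum thingToNum_alt
  rw [thingToNumGo_eq, horner_eq_posSum]
  simp only [PySem.Str.find]
  rw [show (".".toList) = ['.'] from rfl, head_eq value.toList]
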